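-- pv_equiv track=rewrite | github.com/PromiseDodzi/loanword_detection | reimplemented_UNS.py | syllable_split
-- ===== SOURCE A (Python) =====
-- def syllable_split(word):
--     """
--     Split a given word into syllable-like segments based on vowel boundaries.
--     """
--     vowels = "aeiouyAEIOUY"
--     syllables = []
--     current_syllable = ""
--
--     for i, char in enumerate(word):
--         current_syllable += char
--         if char.lower() in vowels:
--             if i < len(word) - 1 and word[i + 1].lower() not in vowels:
--                 syllables.append(current_syllable)
--                 current_syllable = ""
--     if current_syllable:
--         syllables.append(current_syllable)
--
--     if not syllables:
--         return [word]
--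
--     return syllables
-- ===== SOURCE B (Python) =====
-- def syllable_split(word):
--     """Two-phase: collect cut indices over adjacent pairs, then rebuild segments by slicing."""
--     vowels = "aeiouyAEIOUY"
--     cuts = [i for i, (c, d) in enumerate(zip(word, word[1:]))
--             if c.lower() in vowels and d.lower() not in vowels]
--     segs = []
--     start = 0
--     for c in cuts:
--         segs.append(word[start:c + 1])
--         start = c + 1
--     segs.append(word[start:])
--     return segs
-- ===== Notes on version B (the rewrite author's own statement) =====
-- stated objective: alternative
-- what changed: B first collects all cut indices with one comprehension over adjacent character pairs and then rebuilds the segments by slicing from cut to cut, instead of accumulating a current syllable character by character with a non-empty-tail append and an empty-result fallback.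
import Mathlib
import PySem

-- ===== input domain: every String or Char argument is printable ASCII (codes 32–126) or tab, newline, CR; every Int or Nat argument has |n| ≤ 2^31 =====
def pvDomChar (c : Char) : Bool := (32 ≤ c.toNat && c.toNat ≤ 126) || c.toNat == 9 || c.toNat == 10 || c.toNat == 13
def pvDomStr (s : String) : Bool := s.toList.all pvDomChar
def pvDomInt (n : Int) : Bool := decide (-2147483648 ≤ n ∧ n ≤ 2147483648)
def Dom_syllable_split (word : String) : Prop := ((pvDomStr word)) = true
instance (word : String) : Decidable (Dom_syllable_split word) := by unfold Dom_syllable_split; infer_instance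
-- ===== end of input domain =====

-- B rebuilds the segments from a one-pass list of cut indices by slicing, instead of
-- accumulating a current syllable char by char (objective: alternative decomposition).

-- ===== PORT A =====
-- char.lower() in "aeiouyAEIOUY"  (the identical expression occurs in A and in B)
def pvIsVowel (c : Char) : Bool := PySem.Chars.lowerChar c ∈ "aeiouyAEIOUY".toList

-- the lookahead 'i < len(word) - 1 and word[i+1].lower() not in vowels' read structurally
def pvNextNotVowel : List Char → Bool
  | d :: _ => !pvIsVowel d
  | [] => false

-- the for-loop of A: state = current_syllable; emitted syllables are produced in order
def pvALoop : List Char → List Char → List (List Char) × List Char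
  | [], cur => ([], cur)
  | c :: rest, cur =>
    if pvIsVowel c then
      if pvNextNotVowel rest then
        ((cur ++ [c]) :: (pvALoop rest []).1, (pvALoop rest []).2)
      else pvALoop rest (cur ++ [c])
    else pvALoop rest (cur ++ [c])

def syllable_split (word : String) : List String :=
  let p := pvALoop word.toList []
  let syls := if p.2 ≠ [] then p.1 ++ [p.2] else p.1
  if syls = [] then [word] else syls.map String.ofList

-- ===== PORT B =====
-- cuts = [i for i, (c, d) in enumerate(zip(word, word[1:])) if c.lower() in vowels and d.lower() not in vowels]
def pvBCuts (cs : List Char) : List Int :=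
  ((PySem.List.enumerate (cs.zip (PySem.List.slice cs (some 1) none)) 0).filter
      (fun p => pvIsVowel p.2.1 && !pvIsVowel p.2.2)).map (·.1)

-- the reconstruction loop: for c in cuts: append word[start:c+1]; finally append word[start:]
def pvBLoop (cs : List Char) : List Int → Int → List (List Char)
  | [], start => [PySem.List.slice cs (some start) none]
  | k :: cuts, start => PySem.List.slice cs (some start) (some (k + 1)) :: pvBLoop cs cuts (k + 1)

def syllable_split_alt (word : String) : List String :=
  (pvBLoop word.toList (pvBCuts word.toList) 0).map String.ofList

-- ===== PRECONDITION & SPEC =====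
def Spec_syllable_split (word : String) (out : List String) : Prop := out = syllable_split_alt word
instance (word : String) (out : List String) : Decidable (Spec_syllable_split word out) := by unfold Spec_syllable_split; infer_instance

-- ===== CLAIM (what is proved, stated in full; the proofs are below) =====
def Claim_equal_syllable_split : Prop := ∀ (word : String), Dom_syllable_split word → Spec_syllable_split word (syllable_split word)

-- ===== LEMMAS AND PROOFS =====

-- canonical form both ports are reduced to
def pvCanon : List Char → List (List Char)
  | [] => [[]]
  | [c] => [[c]]
  | c :: d :: rest =>
    if pvIsVowel c && !pvIsVowel d then [c] :: pvCanon (d :: rest)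
    else match pvCanon (d :: rest) with
      | s :: ss => (c :: s) :: ss
      | [] => []

def pvMapHead (f : List Char → List Char) : List (List Char) → List (List Char)
  | [] => []
  | s :: ss => f s :: ss

def pvFinish (p : List (List Char) × List Char) : List (List Char) :=
  if p.2 ≠ [] then p.1 ++ [p.2] else p.1

theorem pvCanon_cons2 (c d : Char) (rest : List Char) :
    pvCanon (c :: d :: rest) =
      if pvIsVowel c && !pvIsVowel d then [c] :: pvCanon (d :: rest)
      else match pvCanon (d :: rest) with
        | s :: ss => (c :: s) :: ss
        | [] => [] := rfl

theorem pvALoop_cons (c : Char) (rest cur : List Char) :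
    pvALoop (c :: rest) cur =
      if pvIsVowel c then
        if pvNextNotVowel rest then
          ((cur ++ [c]) :: (pvALoop rest []).1, (pvALoop rest []).2)
        else pvALoop rest (cur ++ [c])
      else pvALoop rest (cur ++ [c]) := rfl

theorem pvCanon_ne_nil (cs : List Char) : pvCanon cs ≠ [] := by
  match cs with
  | [] => simp [pvCanon]
  | [c] => simp [pvCanon]
  | c :: d :: rest =>
    have ih := pvCanon_ne_nil (d :: rest)
    rw [pvCanon_cons2]
    split
    · simp
    · cases h : pvCanon (d :: rest) with
      | nil => exact absurd h ih
      | cons s ss => simp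

theorem pvFinish_cons (x : List Char) (s : List (List Char)) (f : List Char) :
    pvFinish (x :: s, f) = x :: pvFinish (s, f) := by
  unfold pvFinish; by_cases h : f = [] <;> simp [h]

theorem pvALoop_canon (cs : List Char) (cur : List Char) (h : cs ≠ []) :
    pvFinish (pvALoop cs cur) = pvMapHead (cur ++ ·) (pvCanon cs) := by
  match cs with
  | [c] =>
    rw [pvALoop_cons]
    simp [pvNextNotVowel, pvALoop, pvFinish, pvCanon, pvMapHead]
  | c :: d :: rest =>
    obtain ⟨s0, ss, hc⟩ := List.exists_cons_of_ne_nil (pvCanon_ne_nil (d :: rest))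
    rw [pvALoop_cons, pvCanon_cons2]
    by_cases hq : (pvIsVowel c && !pvIsVowel d) = true
    · obtain ⟨hv, hd0⟩ : pvIsVowel c = true ∧ pvIsVowel d = false := by simpa using hq
      have hd : pvNextNotVowel (d :: rest) = true := by simp [pvNextNotVowel, hd0]
      have ih := pvALoop_canon (d :: rest) [] (by simp)
      rw [hc] at ih
      simp only [pvMapHead, List.nil_append] at ih
      simp only [hv, hd, hd0, if_true, Bool.not_false, Bool.true_and]
      rw [pvFinish_cons]
      rw [show ((pvALoop (d :: rest) []).1, (pvALoop (d :: rest) []).2) = pvALoop (d :: rest) [] from rfl]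
      rw [ih, hc]
      simp [pvMapHead]
    · have ih := pvALoop_canon (d :: rest) (cur ++ [c]) (by simp)
      rw [hc] at ih
      have hq' : (pvIsVowel c && !pvIsVowel d) = false := by
        cases hcd : (pvIsVowel c && !pvIsVowel d) with
        | true => exact absurd hcd hq
        | false => rfl
      have hstep :
          (if pvIsVowel c = true then
            if pvNextNotVowel (d :: rest) = true then
              ((cur ++ [c]) :: (pvALoop (d :: rest) []).1, (pvALoop (d :: rest) []).2)
            else pvALoop (d :: rest) (cur ++ [c])
          else pvALoop (d :: rest) (cur ++ [c])) = pvALoop (d :: rest) (cur ++ [c]) := by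
        by_cases hv : pvIsVowel c = true
        · have hd : pvIsVowel d = true := by
            cases h2 : pvIsVowel d with
            | true => rfl
            | false =>
                rw [hv, h2] at hq'
                simp at hq'
          simp [hv, pvNextNotVowel, hd]
        · simp [hv]
      rw [hstep, ih, hq']
      simp [hc, pvMapHead, List.append_assoc]

-- cuts with an explicit enumerate start, for the shift lemma
def pvCutsFrom (ps : List (Char × Char)) (s : Int) : List Int :=
  ((PySem.List.enumerate ps s).filter
      (fun p => pvIsVowel p.2.1 && !pvIsVowel p.2.2)).map (·.1)

theorem pvCutsFrom_shift (ps : List (Char × Char)) (s : Int) :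
    pvCutsFrom ps (s + 1) = (pvCutsFrom ps s).map (· + 1) := by
  induction ps generalizing s with
  | nil => simp [pvCutsFrom, PySem.List.enumerate]
  | cons x ps ih =>
    have h1 := ih (s + 1)
    have h0 := ih s
    simp only [pvCutsFrom, PySem.List.enumerate_cons, List.filter_cons] at h1 h0 ⊢
    by_cases hx : (pvIsVowel x.1 && !pvIsVowel x.2) = true
    · simp only [hx, decide_true, if_true, List.map_cons] at *
      rw [h1, List.map_map]
    · simp only [hx, Bool.false_eq_true, decide_false, if_false] at *
      rw [h1, List.map_map]

theorem pvCutsFrom_nonneg (ps : List (Char × Char)) (s k : Int) (hk : k ∈ pvCutsFrom ps s) : s ≤ k := by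
  induction ps generalizing s with
  | nil => simp [pvCutsFrom, PySem.List.enumerate] at hk
  | cons x ps ih =>
    simp only [pvCutsFrom, PySem.List.enumerate_cons, List.filter_cons] at hk
    by_cases hx : (pvIsVowel x.1 && !pvIsVowel x.2) = true
    · simp only [hx, decide_true, if_true, List.map_cons, List.mem_cons] at hk
      rcases hk with h | h
      · omega
      · have := ih (s + 1) (by simpa [pvCutsFrom] using h)
        omega
    · simp only [hx, Bool.false_eq_true, decide_false, if_false] at hk
      have := ih (s + 1) (by simpa [pvCutsFrom] using hk)
      omega

theorem pvBCuts_eq (cs : List Char) :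
    pvBCuts cs = pvCutsFrom (cs.zip (PySem.List.slice cs (some 1) none)) 0 := rfl

theorem pvBCuts_nil : pvBCuts [] = [] := by decide

theorem pvBCuts_single (c : Char) : pvBCuts [c] = [] := by
  rw [pvBCuts_eq]
  simp [PySem.List.slice_from_one, pvCutsFrom, PySem.List.enumerate]

theorem pvBCuts_cons (c d : Char) (rest : List Char) :
    pvBCuts (c :: d :: rest) =
      (if pvIsVowel c && !pvIsVowel d then [(0 : Int)] else []) ++ (pvBCuts (d :: rest)).map (· + 1) := by
  rw [pvBCuts_eq, pvBCuts_eq]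
  simp only [PySem.List.slice_from_one, List.tail_cons, List.zip_cons_cons]
  have hsh := pvCutsFrom_shift ((d :: rest).zip rest) 0
  norm_num at hsh
  simp only [pvCutsFrom, PySem.List.enumerate_cons, List.filter_cons] at hsh ⊢
  by_cases hx : (pvIsVowel c && !pvIsVowel d) = true
  · simp only [hx, decide_true, if_true, List.map_cons]
    norm_num
    rw [hsh, List.map_map]
  · simp only [hx, Bool.false_eq_true, decide_false, if_false]
    norm_num
    rw [hsh, List.map_map]

theorem pvBCuts_nonneg (cs : List Char) (k : Int) (hk : k ∈ pvBCuts cs) : 0 ≤ k := by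
  rw [pvBCuts_eq] at hk
  exact pvCutsFrom_nonneg _ 0 k hk

theorem pvBLoop_shift (c : Char) (cs : List Char) (cuts : List Int) (s : Int) (hs : 0 ≤ s)
    (hc : ∀ k ∈ cuts, 0 ≤ k) :
    pvBLoop (c :: cs) (cuts.map (· + 1)) (s + 1) = pvBLoop cs cuts s := by
  induction cuts generalizing s with
  | nil =>
    simp only [List.map_nil, pvBLoop]
    rw [PySem.List.slice_from _ (by omega : (0:Int) ≤ s + 1), PySem.List.slice_from _ hs]
    have h1 : (s + 1).toNat = s.toNat + 1 := by omega
    simp [h1]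
  | cons k cuts ih =>
    have hk : 0 ≤ k := hc k (by simp)
    simp only [List.map_cons, pvBLoop]
    have hhead : PySem.List.slice (c :: cs) (some (s + 1)) (some (k + 1 + 1)) =
        PySem.List.slice cs (some s) (some (k + 1)) := by
      rw [PySem.List.slice_toNat _ (show (0:Int) ≤ s + 1 by omega) (show (0:Int) ≤ k + 1 + 1 by omega),
          PySem.List.slice_toNat _ hs (show (0:Int) ≤ k + 1 by omega)]
      have h1 : (s + 1).toNat = s.toNat + 1 := by omega
      have h2 : (k + 1 + 1).toNat = (k + 1).toNat + 1 := by omega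
      simp [h1, h2]
    rw [hhead, ih (k + 1) (by omega) (fun k' hk' => hc k' (List.mem_cons_of_mem _ hk'))]

theorem pvBLoop_canon (cs : List Char) : pvBLoop cs (pvBCuts cs) 0 = pvCanon cs := by
  match cs with
  | [] =>
    rw [pvBCuts_nil]
    simp [pvBLoop, pvCanon, PySem.List.slice_from _ (by norm_num : (0:Int) ≤ 0)]
  | [c] =>
    rw [pvBCuts_single]
    simp [pvBLoop, pvCanon, PySem.List.slice_from _ (by norm_num : (0:Int) ≤ 0)]
  | c :: d :: rest =>
    have ih := pvBLoop_canon (d :: rest)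
    have hnn := pvBCuts_nonneg (d :: rest)
    rw [pvBCuts_cons, pvCanon_cons2]
    by_cases hq : (pvIsVowel c && !pvIsVowel d) = true
    · simp only [hq, if_true, List.singleton_append, pvBLoop]
      rw [pvBLoop_shift c (d :: rest) (pvBCuts (d :: rest)) 0 (le_refl 0) hnn]
      rw [ih]
      have hhead : PySem.List.slice (c :: d :: rest) (some (0 : Int)) (some ((0 : Int) + 1)) = [c] := by
        norm_num
        rw [PySem.List.slice_to _ (show (0:Int) ≤ 1 by norm_num)]
        simp
      rw [hhead]
    · simp only [hq, Bool.false_eq_true, if_false, List.nil_append]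
      cases hcut : pvBCuts (d :: rest) with
      | nil =>
        rw [hcut] at ih
        simp only [List.map_nil, pvBLoop] at ih ⊢
        rw [PySem.List.slice_from _ (le_refl (0:Int))] at ih ⊢
        simp only [Int.toNat_zero, List.drop_zero] at ih ⊢
        rw [← ih]
      | cons k ks =>
        have hk : 0 ≤ k := hnn k (by rw [hcut]; simp)
        have hks : ∀ k' ∈ ks, 0 ≤ k' := fun k' h' => hnn k' (by rw [hcut]; simp [h'])
        rw [hcut] at ih
        simp only [List.map_cons, pvBLoop] at ih ⊢
        rw [pvBLoop_shift c (d :: rest) ks (k + 1) (by omega) hks]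
        have hhead : PySem.List.slice (c :: d :: rest) (some (0 : Int)) (some (k + 1 + 1)) =
            c :: PySem.List.slice (d :: rest) (some (0 : Int)) (some (k + 1)) := by
          rw [PySem.List.slice_toNat _ (show (0:Int) ≤ 0 by norm_num) (show (0:Int) ≤ k + 1 + 1 by omega),
              PySem.List.slice_toNat _ (show (0:Int) ≤ 0 by norm_num) (show (0:Int) ≤ k + 1 by omega)]
          have h2 : (k + 1 + 1).toNat = (k + 1).toNat + 1 := by omega
          simp [h2]
        rw [hhead, ← ih]

theorem pvA_canon (word : String) :
    syllable_split word = (pvCanon word.toList).map String.ofList := by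
  cases h : word.toList with
  | nil =>
    have hw : word = "" := by
      have h2 := congrArg String.ofList h
      rwa [String.ofList_toList] at h2
    simp [syllable_split, h, hw, pvALoop, pvCanon, pvFinish]
  | cons c rest =>
    have hA := pvALoop_canon (c :: rest) [] (by simp)
    obtain ⟨s0, ss, hc⟩ := List.exists_cons_of_ne_nil (pvCanon_ne_nil (c :: rest))
    rw [hc] at hA
    simp only [pvMapHead, List.nil_append] at hA
    unfold pvFinish at hA
    simp only [syllable_split, h]
    rw [hA, hc]
    simp

theorem pvB_canon (word : String) :
    syllable_split_alt word = (pvCanon word.toList).map String.ofList := by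
  unfold syllable_split_alt
  rw [pvBLoop_canon]

-- ===== VERDICT (by name: the statement is the Claim_ definition above) =====
theorem syllable_split_spec : Claim_equal_syllable_split := by
  intro word _
  unfold Spec_syllable_split
  rw [pvA_canon, pvB_canon]
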